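-- pv_equiv track=rewrite | github.com/ItzLeirb/NSIprojectCJG | game.py | detecterVictoireHorizontale
-- ===== SOURCE A (Python) =====
-- def detecterVictoireHorizontale(grille: list[list[int]], index_ligne: int, joueur: int) -> bool:
--     """
--     Verifie si un enchainement de 4 jetons n'as pas ete cree horizontalement
--
--     Entree:
--         grille type: list,
--         index_ligne type: int,
--         joueur type: int
--     Sortie:
--         True si 4 jetons sont alignes, False dans l'autre cas
--     """
--     nombre_daffilee = 0
--
--     # Itere a travers la ligne jouee
--     for index_jeton in range(len(grille)):
--         # Compte le nombre de jetons identiques d'affilee et renvoie True si il y en a 4 ou plus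
--         if grille[index_jeton][index_ligne] == joueur:
--             nombre_daffilee += 1
--             if nombre_daffilee >= 4:
--                 return True
--         else:
--             nombre_daffilee = 0 # Repars a 0 si un jeton manque
--
--     return False
-- ===== SOURCE B (Python) =====
-- def detecterVictoireHorizontale(grille: list[list[int]], index_ligne: int, joueur: int) -> bool:
--     # Extract the column once, then scan it run by run (two pointers),
--     # checking each maximal run of identical tokens instead of keeping a counter.
--     col = [ligne[index_ligne] for ligne in grille]
--     i, n = 0, len(col)
--     while i < n:
--         j = i
--         while j < n and col[j] == col[i]:
--             j += 1
--         if col[i] == joueur and j - i >= 4: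
--             return True
--         i = j
--     return False
-- ===== Notes on version B (the rewrite author's own statement) =====
-- stated objective: alternative
-- what changed: B extracts the column into a list first and then scans it run by run with two pointers, testing each maximal run's value and length, instead of A's single stateful consecutive counter over the grid with early reset.
-- outside the precondition, e.g. on detecterVictoireHorizontale([[1], [1], [1], [1], []], 0, 1): A returns True, B raises IndexError
import Mathlib
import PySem

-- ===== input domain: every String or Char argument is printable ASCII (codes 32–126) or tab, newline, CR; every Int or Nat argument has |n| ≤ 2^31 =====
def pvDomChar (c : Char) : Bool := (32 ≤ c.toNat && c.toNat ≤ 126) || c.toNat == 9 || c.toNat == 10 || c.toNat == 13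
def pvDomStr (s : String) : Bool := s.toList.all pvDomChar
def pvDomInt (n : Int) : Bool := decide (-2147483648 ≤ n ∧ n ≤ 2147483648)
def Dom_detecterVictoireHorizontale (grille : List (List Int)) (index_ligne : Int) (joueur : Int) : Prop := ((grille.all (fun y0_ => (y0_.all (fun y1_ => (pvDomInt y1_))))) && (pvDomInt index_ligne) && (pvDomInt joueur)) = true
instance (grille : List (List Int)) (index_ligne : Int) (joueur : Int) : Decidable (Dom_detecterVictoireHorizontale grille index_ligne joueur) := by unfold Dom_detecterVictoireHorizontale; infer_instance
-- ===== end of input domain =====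

-- B extracts the column once and scans it run by run (two pointers) instead of A's stateful consecutive counter; same cost, different decomposition.


-- ===== PORT A =====
-- A's loop over range(len(grille)) with the running counter nombre_daffilee.
-- grille[index_jeton][index_ligne] is pyGet?; none (IndexError) is outside Pre_ and returns false here.
def pvGoA (rows : List (List Int)) (index_ligne joueur : Int) (c : Int) : Bool :=
  match rows with
  | [] => false
  | row :: rest =>
    match PySem.List.pyGet? row index_ligne with
    | none => false
    | some v =>
      if v == joueur then
        (if c + 1 ≥ 4 then true else pvGoA rest index_ligne joueur (c + 1))
      else pvGoA rest index_ligne joueur 0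

def detecterVictoireHorizontale (grille : List (List Int)) (index_ligne : Int) (joueur : Int) : Bool :=
  pvGoA grille index_ligne joueur 0

-- ===== PORT B =====
-- the comprehension [ligne[index_ligne] for ligne in grille]; none = an IndexError in it
def pvColOf (grille : List (List Int)) (index_ligne : Int) : Option (List Int) :=
  match grille with
  | [] => some []
  | row :: rest =>
    match PySem.List.pyGet? row index_ligne, pvColOf rest index_ligne with
    | some v, some c => some (v :: c)
    | _, _ => none

-- length of the leading run of elements equal to v (B's inner while loop count j - i)
def pvRunLen (v : Int) : List Int → Nat
  | [] => 0
  | x :: xs => if x == v then pvRunLen v xs + 1 else 0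

-- B's outer while loop: examine the maximal run at the front, then jump past it
def pvGoB (col : List Int) (joueur : Int) : Bool :=
  match col with
  | [] => false
  | x :: xs =>
    let k := pvRunLen x (x :: xs)
    if x == joueur && decide (4 ≤ k) then true
    else pvGoB (xs.drop (k - 1)) joueur
termination_by col.length
decreasing_by
  simp only [List.length_drop, List.length_cons]
  omega

def detecterVictoireHorizontale_alt (grille : List (List Int)) (index_ligne : Int) (joueur : Int) : Bool :=
  match pvColOf grille index_ligne with
  | none => false
  | some col => pvGoB col joueur

-- ===== PRECONDITION & SPEC =====
-- Pre_ excludes grids in which some row lacks index_ligne (IndexError): B raises there because it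
-- builds the whole column first, while A may raise or may return True early before the bad row.
def Pre_detecterVictoireHorizontale (grille : List (List Int)) (index_ligne : Int) (_joueur : Int) : Prop :=
  ∀ row ∈ grille, PySem.Raise.InRange row.length index_ligne
instance (grille : List (List Int)) (index_ligne : Int) (joueur : Int) : Decidable (Pre_detecterVictoireHorizontale grille index_ligne joueur) := by unfold Pre_detecterVictoireHorizontale; infer_instance

def pvWitness_detecterVictoireHorizontale : List (List Int) × Int × Int :=
  ([[1, 0], [1, 2], [1, 0], [1, 1]], 0, 1)

def Spec_detecterVictoireHorizontale (grille : List (List Int)) (index_ligne : Int) (joueur : Int) (out : Bool) : Prop := out = detecterVictoireHorizontale_alt grille index_ligne joueur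
instance (grille : List (List Int)) (index_ligne : Int) (joueur : Int) (out : Bool) : Decidable (Spec_detecterVictoireHorizontale grille index_ligne joueur out) := by unfold Spec_detecterVictoireHorizontale; infer_instance

-- ===== CLAIM (what is proved, stated in full; the proofs are below) =====
def Claim_equal_detecterVictoireHorizontale : Prop := ∀ (grille : List (List Int)) (index_ligne : Int) (joueur : Int), Dom_detecterVictoireHorizontale grille index_ligne joueur → Pre_detecterVictoireHorizontale grille index_ligne joueur → Spec_detecterVictoireHorizontale grille index_ligne joueur (detecterVictoireHorizontale grille index_ligne joueur)

-- ===== LEMMAS AND PROOFS =====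

-- proof-side view of A's loop, over the already-extracted column
def pvGoACol : List Int → Int → Int → Bool
  | [], _, _ => false
  | x :: xs, j, c =>
    if x == j then (if c + 1 ≥ 4 then true else pvGoACol xs j (c + 1))
    else pvGoACol xs j 0

theorem pvColOf_some (grille : List (List Int)) (il j : Int)
    (h : Pre_detecterVictoireHorizontale grille il j) :
    ∃ col, pvColOf grille il = some col := by
  induction grille with
  | nil => exact ⟨[], rfl⟩
  | cons row rest ih =>
    obtain ⟨col, hcol⟩ := ih (fun r hr => h r (List.mem_cons_of_mem _ hr))
    have hin : PySem.Raise.InRange row.length il := h row (List.mem_cons_self ..)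
    have hne : PySem.List.pyGet? row il ≠ none := by
      simp [PySem.List.pyGet?_eq_none_iff, hin]
    obtain ⟨v, hv⟩ := Option.ne_none_iff_exists'.mp hne
    exact ⟨v :: col, by simp [pvColOf, hv, hcol]⟩

theorem pvGoA_eq_col (grille : List (List Int)) (il j : Int) :
    ∀ (c : Int) (col : List Int), pvColOf grille il = some col →
    pvGoA grille il j c = pvGoACol col j c := by
  induction grille with
  | nil =>
    intro c col h
    simp only [pvColOf, Option.some.injEq] at h
    subst h; rfl
  | cons row rest ih =>
    intro c col h
    simp only [pvColOf] at h
    cases hg : PySem.List.pyGet? row il with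
    | none => simp [hg] at h
    | some v =>
      cases hr : pvColOf rest il with
      | none => simp [hg, hr] at h
      | some c' =>
        simp only [hg, hr, Option.some.injEq] at h
        subst h
        simp only [pvGoA, hg, pvGoACol]
        split
        · split
          · rfl
          · exact ih _ _ hr
        · exact ih _ _ hr

-- a counter that will reach 4 within the leading run of joueur makes A's loop return true
theorem pvGoACol_true_of_run (col : List Int) (j : Int) :
    ∀ c : Int, 0 ≤ c → c ≤ 3 → 4 ≤ c + (pvRunLen j col : Int) →
    pvGoACol col j c = true := by
  induction col with
  | nil => intro c h0 h3 h4; simp [pvRunLen] at h4; omega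
  | cons x xs ih =>
    intro c h0 h3 h4
    by_cases hx : x == j
    · simp only [pvGoACol, hx, if_pos]
      by_cases hc : c + 1 ≥ 4
      · simp [hc]
      · simp only [hc, if_false]
        apply ih (c + 1) (by omega) (by omega)
        simp only [pvRunLen, hx] at h4
        push_cast at h4 ⊢
        omega
    · simp [pvRunLen, hx] at h4
      omega
    
-- consuming a short leading run of joueur only advances the column and resets the counter
theorem pvGoACol_skip_run (col : List Int) (j : Int) :
    ∀ c : Int, 0 ≤ c → c + (pvRunLen j col : Int) ≤ 3 →
    pvGoACol col j c = pvGoACol (col.drop (pvRunLen j col)) j 0 := by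
  induction col with
  | nil => intro c _ _; simp [pvRunLen, pvGoACol]
  | cons x xs ih =>
    intro c h0 h3
    by_cases hx : x == j
    · simp only [pvRunLen, hx, if_pos] at h3 ⊢
      have hlt : ¬ (c + 1 ≥ 4) := by push_cast at h3; omega
      simp only [pvGoACol, hx, if_pos, hlt, if_false, List.drop_succ_cons]
      apply ih (c + 1) (by omega)
      push_cast at h3 ⊢; omega
    · simp only [pvRunLen, hx]
      simp [pvGoACol, hx]

-- a leading run of a non-joueur value just resets the counter at every step
theorem pvGoACol_skip_ne (col : List Int) (j v : Int) (hv : (v == j) = false) :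
    pvGoACol col j 0 = pvGoACol (col.drop (pvRunLen v col)) j 0 := by
  induction col with
  | nil => simp [pvRunLen]
  | cons x xs ih =>
    by_cases hx : x == v
    · have hxj : (x == j) = false := by
        simp at hx; subst hx; exact hv
      simp only [pvRunLen, hx, if_pos, List.drop_succ_cons]
      rw [show pvGoACol (x :: xs) j 0 = pvGoACol xs j 0 by simp [pvGoACol, hxj]]
      exact ih
    · simp [pvRunLen, hx]

theorem pvRunLen_cons_self (x : Int) (xs : List Int) :
    pvRunLen x (x :: xs) = pvRunLen x xs + 1 := by
  simp [pvRunLen]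

theorem pvGoB_cons (x : Int) (xs : List Int) (j : Int) :
    pvGoB (x :: xs) j =
      if x == j && decide (4 ≤ pvRunLen x (x :: xs)) then true
      else pvGoB (xs.drop (pvRunLen x (x :: xs) - 1)) j := by
  rw [pvGoB]

theorem pvGoACol_eq_pvGoB_aux (j : Int) :
    ∀ (n : Nat) (col : List Int), col.length ≤ n → pvGoACol col j 0 = pvGoB col j := by
  intro n
  induction n with
  | zero =>
    intro col hlen
    have : col = [] := List.eq_nil_of_length_eq_zero (Nat.le_zero.mp hlen)
    subst this
    rw [pvGoB]; rfl
  | succ n ih =>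
    intro col hlen
    cases col with
    | nil => rw [pvGoB]; rfl
    | cons x xs =>
      rw [pvGoB_cons]
      have hdropn : (xs.drop (pvRunLen x (x :: xs) - 1)).length ≤ n := by
        simp only [List.length_drop]
        simp only [List.length_cons] at hlen
        omega
      by_cases hx : x == j
      · have hxeq : x = j := by simpa using hx
        have hkj : pvRunLen j (x :: xs) = pvRunLen x (x :: xs) := by rw [hxeq]
        by_cases h4 : 4 ≤ pvRunLen x (x :: xs)
        · rw [if_pos (by simp [hx, h4])]
          apply pvGoACol_true_of_run _ _ 0 le_rfl (by norm_num)
          rw [hkj]; omega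
        · rw [if_neg (by simp [h4])]
          rw [pvGoACol_skip_run (x :: xs) j 0 le_rfl (by rw [hkj]; omega)]
          rw [hkj, pvRunLen_cons_self, Nat.add_sub_cancel, List.drop_succ_cons]
          rw [show pvRunLen x xs = pvRunLen x xs + 1 - 1 from rfl, ← pvRunLen_cons_self]
          exact ih _ hdropn
      · rw [if_neg (by simp [hx])]
        rw [pvGoACol_skip_ne (x :: xs) j x (by simpa using hx)]
        rw [pvRunLen_cons_self, Nat.add_sub_cancel, List.drop_succ_cons]
        rw [show pvRunLen x xs = pvRunLen x xs + 1 - 1 from rfl, ← pvRunLen_cons_self]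
        exact ih _ hdropn

-- ===== VERDICT (by name: the statement is the Claim_ definition above) =====
theorem detecterVictoireHorizontale_spec : Claim_equal_detecterVictoireHorizontale := by
  intro grille il j _ hpre
  unfold Spec_detecterVictoireHorizontale
  obtain ⟨col, hcol⟩ := pvColOf_some grille il j hpre
  unfold detecterVictoireHorizontale detecterVictoireHorizontale_alt
  rw [hcol, pvGoA_eq_col grille il j 0 col hcol,
     pvGoACol_eq_pvGoB_aux j col.length col le_rfl]
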